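-- pv_equiv track=rewrite | github.com/OPTML-Group/Unlearn-Trace | data_process/mixed_train.py | merge_fixed
-- ===== SOURCE A (Python) =====
-- def merge_fixed(l1, l2, decisions):
--     i = j = d = 0
--     merged = []
--     while len(merged) < len(l1) + len(l2):
--         if i >= len(l1):
--             merged.append(l2[j]); j += 1
--         elif j >= len(l2):
--             merged.append(l1[i]); i += 1
--         else:
--             if decisions[d]:
--                 merged.append(l1[i]); i += 1
--             else:
--                 merged.append(l2[j]); j += 1
--             d += 1
--     return merged
-- ===== SOURCE B (Python) =====
-- def merge_fixed(l1, l2, decisions):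
--     # Structural recursion on the remaining suffixes: no index counters, no
--     # mutable accumulator. Once either list is empty, the other is the answer.
--     if not l1:
--         return list(l2)
--     if not l2:
--         return list(l1)
--     if decisions[0]:
--         return [l1[0]] + merge_fixed(l1[1:], l2, decisions[1:])
--     else:
--         return [l2[0]] + merge_fixed(l1, l2[1:], decisions[1:])
-- ===== Notes on version B (the rewrite author's own statement) =====
-- stated objective: alternative
-- what changed: A runs an imperative while loop over three index counters i/j/d with per-iteration exhaustion tests and a mutable accumulator; B is a head-first structural recursion on the list suffixes with no counters and no accumulator, returning the remaining list outright when the other is empty.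
import Mathlib
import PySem

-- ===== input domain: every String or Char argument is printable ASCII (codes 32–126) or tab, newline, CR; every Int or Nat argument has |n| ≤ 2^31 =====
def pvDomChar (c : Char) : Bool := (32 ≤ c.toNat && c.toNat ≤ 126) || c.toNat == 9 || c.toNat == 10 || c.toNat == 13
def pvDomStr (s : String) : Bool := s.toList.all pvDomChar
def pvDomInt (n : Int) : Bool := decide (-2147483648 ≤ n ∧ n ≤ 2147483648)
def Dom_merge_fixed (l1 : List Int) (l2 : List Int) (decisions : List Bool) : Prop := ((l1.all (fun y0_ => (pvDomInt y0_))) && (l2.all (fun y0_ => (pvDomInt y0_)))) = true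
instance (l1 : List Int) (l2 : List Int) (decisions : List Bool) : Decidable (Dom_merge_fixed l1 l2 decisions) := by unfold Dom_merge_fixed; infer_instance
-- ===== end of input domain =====

-- ===== PORT A =====
-- B replaces A's counter-driven while loop by a head-first structural recursion (same return
-- values on Pre_; alternative decomposition, not claimed faster).
-- Python l2[j]/l1[i] in A are always in range when reached (merged.length = i+j < len l1 + len l2
-- forces it); decisions[d] can raise IndexError — exactly the inputs Pre_merge_fixed excludes;
-- getD's default is never used inside Pre_.
def mergeLoopA (l1 : List Int) (l2 : List Int) (decisions : List Bool) :
    Nat → Nat → Nat → Nat → List Int → List Int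
  | 0, _, _, _, merged => merged
  | fuel+1, i, j, d, merged =>
    if merged.length < l1.length + l2.length then
      if i ≥ l1.length then
        mergeLoopA l1 l2 decisions fuel i (j+1) d (merged ++ [l2.getD j 0])
      else if j ≥ l2.length then
        mergeLoopA l1 l2 decisions fuel (i+1) j d (merged ++ [l1.getD i 0])
      else
        if decisions.getD d false then
          mergeLoopA l1 l2 decisions fuel (i+1) j (d+1) (merged ++ [l1.getD i 0])
        else
          mergeLoopA l1 l2 decisions fuel i (j+1) (d+1) (merged ++ [l2.getD j 0])
    else merged

-- the while loop runs exactly l1.length + l2.length times (merged grows by one each iteration)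
def merge_fixed (l1 : List Int) (l2 : List Int) (decisions : List Bool) : List Int :=
  mergeLoopA l1 l2 decisions (l1.length + l2.length) 0 0 0 []

-- ===== PORT B =====
-- Source B's structural recursion: empty side → return the other list; otherwise consume
-- decisions[0] and cons the chosen head onto the recursive result on the suffixes.
def merge_fixed_alt (l1 : List Int) (l2 : List Int) (decisions : List Bool) : List Int :=
  match l1, l2, decisions with
  | [], l2, _ => l2
  | l1, [], _ => l1
  | x :: xs, y :: ys, c :: ds =>
      if c then x :: merge_fixed_alt xs (y :: ys) ds
      else y :: merge_fixed_alt (x :: xs) ys ds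
  | _ :: _, _ :: _, [] => []   -- Python: decisions[0] raises IndexError; outside Pre_

-- ===== PRECONDITION & SPEC =====
-- Pre_ excludes exactly the inputs on which A raises IndexError (decisions exhausted while both
-- lists still have unconsumed elements): A returns normally iff decisions contains enough trues
-- to exhaust l1 or enough falses to exhaust l2.
def Pre_merge_fixed (l1 : List Int) (l2 : List Int) (decisions : List Bool) : Prop :=
  l1.length ≤ decisions.count true ∨ l2.length ≤ decisions.count false

instance (l1 : List Int) (l2 : List Int) (decisions : List Bool) : Decidable (Pre_merge_fixed l1 l2 decisions) := by unfold Pre_merge_fixed; infer_instance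

def pvWitness_merge_fixed : List Int × List Int × List Bool := ([1, 2], [3], [true, false, true])

def Spec_merge_fixed (l1 : List Int) (l2 : List Int) (decisions : List Bool) (out : List Int) : Prop := out = merge_fixed_alt l1 l2 decisions
instance (l1 : List Int) (l2 : List Int) (decisions : List Bool) (out : List Int) : Decidable (Spec_merge_fixed l1 l2 decisions out) := by unfold Spec_merge_fixed; infer_instance

-- ===== CLAIM (what is proved, stated in full; the proofs are below) =====
def Claim_equal_merge_fixed : Prop := ∀ (l1 : List Int) (l2 : List Int) (decisions : List Bool), Dom_merge_fixed l1 l2 decisions → Pre_merge_fixed l1 l2 decisions → Spec_merge_fixed l1 l2 decisions (merge_fixed l1 l2 decisions)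

-- ===== LEMMAS AND PROOFS =====

-- B on an exhausted side returns the other list
theorem alt_nil_left (ys : List Int) (ds : List Bool) : merge_fixed_alt [] ys ds = ys := by
  simp [merge_fixed_alt]

theorem alt_nil_mid (xs : List Int) (ds : List Bool) : merge_fixed_alt xs [] ds = xs := by
  cases xs <;> simp [merge_fixed_alt]

-- loop invariant: A's indexed loop computes B's recursion on the remaining suffixes
theorem loopA_eq (l1 l2 : List Int) (decisions : List Bool) :
    ∀ (fuel i j d : Nat) (merged : List Int),
      fuel = (l1.length - i) + (l2.length - j) →
      merged.length = i + j → i ≤ l1.length → j ≤ l2.length →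
      (l1.length - i ≤ (decisions.drop d).count true ∨
       l2.length - j ≤ (decisions.drop d).count false) →
      mergeLoopA l1 l2 decisions fuel i j d merged =
        merged ++ merge_fixed_alt (l1.drop i) (l2.drop j) (decisions.drop d) := by
  intro fuel
  induction fuel with
  | zero =>
    intro i j d merged hf hm hi hj _
    have h1 : l1.drop i = [] := List.drop_eq_nil_iff.mpr (by omega)
    simp [mergeLoopA, h1, alt_nil_left, List.drop_eq_nil_iff.mpr (show l2.length ≤ j by omega)]
  | succ fuel ih =>
    intro i j d merged hf hm hi hj hpre
    have hlt : merged.length < l1.length + l2.length := by omega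
    by_cases hil : l1.length ≤ i
    · -- l1 exhausted: A copies l2[j], B returns the l2 tail
      have hjlt : j < l2.length := by omega
      have h1 : l1.drop i = [] := List.drop_eq_nil_iff.mpr hil
      rw [show mergeLoopA l1 l2 decisions (fuel+1) i j d merged =
            mergeLoopA l1 l2 decisions fuel i (j+1) d (merged ++ [l2.getD j 0]) by
          simp [mergeLoopA, hlt, hil]]
      rw [ih i (j+1) d _ (by omega) (by simp [hm]; omega) hi (by omega) (Or.inl (by omega))]
      rw [h1, alt_nil_left, alt_nil_left]
      rw [List.drop_eq_getElem_cons hjlt]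
      simp [List.getD, List.getElem?_eq_getElem hjlt]
    · have hilt : i < l1.length := by omega
      by_cases hjl : l2.length ≤ j
      · -- l2 exhausted: A copies l1[i], B returns the l1 tail
        have h2 : l2.drop j = [] := List.drop_eq_nil_iff.mpr hjl
        rw [show mergeLoopA l1 l2 decisions (fuel+1) i j d merged =
              mergeLoopA l1 l2 decisions fuel (i+1) j d (merged ++ [l1.getD i 0]) by
            simp [mergeLoopA, hlt, hil, hjl]]
        rw [ih (i+1) j d _ (by omega) (by simp [hm]; omega) (by omega) hj (Or.inr (by omega))]
        rw [h2, alt_nil_mid, alt_nil_mid]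
        rw [List.drop_eq_getElem_cons hilt]
        simp [List.getD, List.getElem?_eq_getElem hilt]
      · -- both sides live: A consumes decisions[d], exactly B's cons step
        have hjlt : j < l2.length := by omega
        have hdne : decisions.drop d ≠ [] := by
          rcases hpre with h | h
          · intro hnil; rw [hnil] at h; simp at h; omega
          · intro hnil; rw [hnil] at h; simp at h; omega
        obtain ⟨c, ds', hd⟩ := List.exists_cons_of_ne_nil hdne
        have hc : decisions.getD d false = c := by
          have h := congrArg List.head? hd
          rw [List.head?_drop] at h
          simp [List.getD, h]
        have hd1 : decisions.drop (d+1) = ds' := by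
          rw [← List.tail_drop, hd]; rfl
        cases c with
        | true =>
          rw [show mergeLoopA l1 l2 decisions (fuel+1) i j d merged =
                mergeLoopA l1 l2 decisions fuel (i+1) j (d+1) (merged ++ [l1.getD i 0]) by
              simp only [mergeLoopA]
              rw [if_pos hlt, if_neg (by omega), if_neg (by omega), hc]
              simp]
          rw [ih (i+1) j (d+1) _ (by omega) (by simp [hm]; omega) (by omega) hj
              (by rw [hd1]
                  rcases hpre with h | h
                  · left; rw [hd] at h; simp at h; omega
                  · right; rw [hd] at h; simp at h; omega)]
          rw [hd1, hd, List.drop_eq_getElem_cons hilt, List.drop_eq_getElem_cons hjlt]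
          simp [merge_fixed_alt, List.getD, List.getElem?_eq_getElem hilt]
        | false =>
          rw [show mergeLoopA l1 l2 decisions (fuel+1) i j d merged =
                mergeLoopA l1 l2 decisions fuel i (j+1) (d+1) (merged ++ [l2.getD j 0]) by
              simp only [mergeLoopA]
              rw [if_pos hlt, if_neg (by omega), if_neg (by omega), hc]
              simp]
          rw [ih i (j+1) (d+1) _ (by omega) (by simp [hm]; omega) (by omega) (by omega)
              (by rw [hd1]
                  rcases hpre with h | h
                  · left; rw [hd] at h; simp at h; omega
                  · right; rw [hd] at h; simp at h; omega)]
          rw [hd1, hd, List.drop_eq_getElem_cons hilt, List.drop_eq_getElem_cons hjlt]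
          simp [merge_fixed_alt, List.getD, List.getElem?_eq_getElem hjlt]

-- ===== VERDICT (by name: the statement is the Claim_ definition above) =====
theorem merge_fixed_spec : Claim_equal_merge_fixed := by
  intro l1 l2 decisions _ hpre
  unfold Spec_merge_fixed merge_fixed
  rw [loopA_eq l1 l2 decisions (l1.length + l2.length) 0 0 0 [] (by simp) (by simp) (by simp) (by simp)
      (by simpa using hpre)]
  simp
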